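-- pv_equiv track=rewrite | github.com/mingkaid/rl-prompt | sql/data_utils.py | collect_unique_examples_from_examples
-- ===== SOURCE A (Python) =====
-- from collections import defaultdict
-- from typing import Any, List, Dict, Tuple, Callable, Optional
--
-- def collect_unique_examples_from_examples(
--         examples: List[Tuple[str, str]],
-- ) -> Tuple[List[Tuple[str, str]],
--            Dict[str, List[str]]]:
--
--     unique_dict = defaultdict(list)
--     unique_examples = []
--
--     for source, target in examples:
--         unique_dict[source].append(target)
--
--     for source, targets in unique_dict.items():
--         # Just use one of the targets as a placeholder
--         unique_examples.append((source, targets[0]))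
--
--     return unique_examples, unique_dict
-- ===== SOURCE B (Python) =====
-- from collections import defaultdict
-- from typing import List, Dict, Tuple
--
--
-- def collect_unique_examples_from_examples(
--         examples: List[Tuple[str, str]],
-- ) -> Tuple[List[Tuple[str, str]],
--            Dict[str, List[str]]]:
--     # Single pass: record the first (source, target) pair the moment a new
--     # source appears, while grouping all targets per source.
--     unique_dict = defaultdict(list)
--     unique_examples = []
--     for source, target in examples:
--         if source not in unique_dict:
--             unique_examples.append((source, target))
--         unique_dict[source].append(target)
--     return unique_examples, unique_dict
-- ===== Notes on version B (the rewrite author's own statement) =====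
-- stated objective: simpler
-- what changed: Fused A's two passes (group all targets, then re-scan the dict for placeholders) into one pass that emits the (source, first target) pair the moment a new source is seen.
import Mathlib
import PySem

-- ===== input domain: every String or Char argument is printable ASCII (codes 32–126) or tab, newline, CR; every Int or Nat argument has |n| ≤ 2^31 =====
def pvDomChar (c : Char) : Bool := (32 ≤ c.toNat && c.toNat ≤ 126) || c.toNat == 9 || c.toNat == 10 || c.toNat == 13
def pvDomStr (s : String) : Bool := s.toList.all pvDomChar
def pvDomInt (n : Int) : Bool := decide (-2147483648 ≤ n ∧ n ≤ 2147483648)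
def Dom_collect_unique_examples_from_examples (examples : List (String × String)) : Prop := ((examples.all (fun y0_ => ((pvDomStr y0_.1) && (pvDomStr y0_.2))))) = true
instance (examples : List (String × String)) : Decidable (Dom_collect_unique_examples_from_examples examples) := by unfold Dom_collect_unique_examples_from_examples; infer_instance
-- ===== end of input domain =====

-- B fuses A's two passes into one (emit the placeholder when a source is first seen); objective: simpler.

-- ===== PORT A =====
-- pass 1: unique_dict[source].append(target) for every pair
-- pass 2: unique_examples.append((source, targets[0])) over the dict's items
--   (targets[0] never raises here: every stored list is nonempty, so '.getD ""' is never consulted)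
def collect_unique_examples_from_examples (examples : List (String × String)) : (List (String × String)) × (List (String × List String)) :=
  let unique_dict : PySem.Dict String (List String) :=
    examples.foldl (fun d p => d.modify p.1 [] (fun ts => ts ++ [p.2])) PySem.Dict.empty
  let unique_examples : List (String × String) :=
    unique_dict.items.foldl (fun acc p => acc ++ [(p.1, (PySem.List.pyGet? p.2 0).getD "")]) []
  (unique_examples, unique_dict.items)

-- ===== PORT B =====
def collect_unique_examples_from_examples_alt (examples : List (String × String)) : (List (String × String)) × (List (String × List String)) :=
  let st :=
    examples.foldl
      (fun (st : List (String × String) × PySem.Dict String (List String)) p =>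
        let ue := if st.2.contains p.1 then st.1 else st.1 ++ [(p.1, p.2)]
        (ue, st.2.modify p.1 [] (fun ts => ts ++ [p.2])))
      ([], PySem.Dict.empty)
  (st.1, st.2.items)

-- ===== PRECONDITION & SPEC =====
def Spec_collect_unique_examples_from_examples (examples : List (String × String)) (out : (List (String × String)) × (List (String × List String))) : Prop := out = collect_unique_examples_from_examples_alt examples
instance (examples : List (String × String)) (out : (List (String × String)) × (List (String × List String))) : Decidable (Spec_collect_unique_examples_from_examples examples out) := by unfold Spec_collect_unique_examples_from_examples; infer_instance

-- ===== CLAIM (what is proved, stated in full; the proofs are below) =====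
def Claim_equal_collect_unique_examples_from_examples : Prop := ∀ (examples : List (String × String)), Dom_collect_unique_examples_from_examples examples → Spec_collect_unique_examples_from_examples examples (collect_unique_examples_from_examples examples)

-- ===== LEMMAS AND PROOFS =====

-- the placeholder taken from a group (first target of a nonempty target list)
def pvPh (p : String × List String) : String × String := (p.1, (PySem.List.pyGet? p.2 0).getD "")

lemma pvPh_append (s t : String) (v : List String) (hv : v ≠ []) :
    pvPh (s, v ++ [t]) = (s, (PySem.List.pyGet? v 0).getD "") := by
  cases v with
  | nil => exact absurd rfl hv
  | cons a l =>
    simp [pvPh, PySem.List.pyGet?, PySem.List.pyIdx?,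
      show (0:Int) ≤ (l.length : Int) + 1 by positivity]

-- with nodup keys, the first match get? finds is any member with that key
lemma get?_of_mem_nodup (items : List (String × List String)) (p : String × List String)
    (hnd : (items.map (·.1)).Nodup) (hp : p ∈ items) :
    (PySem.Dict.mk items).get? p.1 = some p.2 := by
  induction items with
  | nil => cases hp
  | cons q rest ih =>
    rcases List.mem_cons.mp hp with h | h
    · subst h; simp [PySem.Dict.get?, List.find?]
    · simp only [List.map_cons, List.nodup_cons] at hnd
      have hne : ¬ (q.1 == p.1) = true := by
        intro hb
        exact hnd.1 (by rw [eq_of_beq hb]; exact List.mem_map.mpr ⟨p, h, rfl⟩)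
      have := ih hnd.2 h
      simpa [PySem.Dict.get?, List.find?, hne] using this

-- one step of A's grouping loop preserves: nonempty values, nodup keys, and ue = items.map pvPh,
-- and updates ue exactly as B's fused step does
lemma step_inv (d : PySem.Dict String (List String)) (s t : String)
    (hne : ∀ p ∈ d.items, p.2 ≠ []) (hnd : (d.items.map (·.1)).Nodup) :
    (∀ p ∈ (d.modify s [] (fun ts => ts ++ [t])).items, p.2 ≠ []) ∧
    ((d.modify s [] (fun ts => ts ++ [t])).items.map (·.1)).Nodup ∧
    (d.modify s [] (fun ts => ts ++ [t])).items.map pvPh =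
      (if d.contains s then d.items.map pvPh else d.items.map pvPh ++ [(s, t)]) := by
  by_cases hc : d.contains s = true
  · -- key present: items are rewritten in place
    obtain ⟨p0, hp0, hk⟩ : ∃ p ∈ d.items, (p.1 == s) = true := by
      simpa [PySem.Dict.contains, List.any_eq_true] using hc
    have hk' : p0.1 = s := eq_of_beq hk
    have hget : d.get? s = some p0.2 := by
      have := get?_of_mem_nodup d.items p0 hnd hp0; rwa [hk'] at this
    have hitems : (d.modify s [] (fun ts => ts ++ [t])).items =
        d.items.map (fun p => if (p.1 == s) = true then (s, p0.2 ++ [t]) else p) := by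
      simp [PySem.Dict.modify, PySem.Dict.insert, hc, PySem.Dict.getD, hget]
    refine ⟨?_, ?_, ?_⟩
    · intro p hp
      rw [hitems] at hp
      obtain ⟨q, hq, hqe⟩ := List.mem_map.mp hp
      by_cases h : (q.1 == s) = true
      · simp [h] at hqe; simp [← hqe]
      · simp [h] at hqe; exact hqe ▸ hne q hq
    · rw [hitems]
      have heq : (d.items.map (fun p => if (p.1 == s) = true then (s, p0.2 ++ [t]) else p)).map (·.1)
          = d.items.map (·.1) := by
        rw [List.map_map]
        apply List.map_congr_left
        intro q _
        by_cases h : (q.1 == s) = true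
        · simp [Function.comp, eq_of_beq h]
        · simp [Function.comp, h]
      rw [heq]; exact hnd
    · rw [hitems, if_pos hc, List.map_map]
      apply List.map_congr_left
      intro q hq
      by_cases h : (q.1 == s) = true
      · have hq1 : q.1 = s := eq_of_beq h
        have : q.2 = p0.2 := by
          have := get?_of_mem_nodup d.items q hnd hq
          rw [hq1, hget] at this; exact (Option.some.injEq _ _ ▸ this).symm
        simp only [Function.comp, h, if_pos]
        rw [pvPh_append s t p0.2 (hne p0 hp0), ← this, ← hq1]; rfl
      · simp [Function.comp, h]
  · -- new key: appended at the end, with value [t]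
    have hc' : ∀ p ∈ d.items, ¬ (p.1 == s) = true := by
      intro p hp hb
      exact hc (by simp only [PySem.Dict.contains, List.any_eq_true]; exact ⟨p, hp, hb⟩)
    have hget : d.get? s = none := by
      simp only [PySem.Dict.get?, Option.map_eq_none_iff, List.find?_eq_none]
      intro p hp; exact hc' p hp
    have hitems : (d.modify s [] (fun ts => ts ++ [t])).items = d.items ++ [(s, [t])] := by
      simp [PySem.Dict.modify, PySem.Dict.insert, hc, PySem.Dict.getD, hget]
    refine ⟨?_, ?_, ?_⟩
    · intro p hp; rw [hitems] at hp
      rcases List.mem_append.mp hp with h | h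
      · exact hne p h
      · simp at h; simp [h]
    · rw [hitems]
      simp only [List.map_append, List.map_cons, List.map_nil]
      rw [List.nodup_append]
      refine ⟨hnd, List.nodup_singleton s, ?_⟩
      intro x hx y hy
      obtain ⟨q, hq, hqe⟩ := List.mem_map.mp hx
      rw [List.mem_singleton] at hy
      subst hy
      intro hxy
      have hq1 : q.1 = y := by rw [← hxy]; simpa using hqe
      exact hc' q hq (by simp [hq1])
    · rw [hitems, if_neg hc]
      simp [pvPh, PySem.List.pyGet?, PySem.List.pyIdx?]

-- the fused loop computes (items.map pvPh, final dict) from any state satisfying the invariant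
lemma loop_eq (examples : List (String × String)) :
    ∀ (d : PySem.Dict String (List String)),
      (∀ p ∈ d.items, p.2 ≠ []) → ((d.items.map (·.1)).Nodup) →
      examples.foldl
        (fun (st : List (String × String) × PySem.Dict String (List String)) p =>
          let ue := if st.2.contains p.1 then st.1 else st.1 ++ [(p.1, p.2)]
          (ue, st.2.modify p.1 [] (fun ts => ts ++ [p.2])))
        (d.items.map pvPh, d)
      = (((examples.foldl (fun d p => d.modify p.1 [] (fun ts => ts ++ [p.2])) d).items).map pvPh,
          examples.foldl (fun d p => d.modify p.1 [] (fun ts => ts ++ [p.2])) d) := by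
  induction examples with
  | nil => intro d _ _; simp
  | cons p rest ih =>
    intro d hne hnd
    obtain ⟨h1, h2, h3⟩ := step_inv d p.1 p.2 hne hnd
    simp only [List.foldl_cons]
    rw [show (if d.contains p.1 then d.items.map pvPh else d.items.map pvPh ++ [(p.1, p.2)])
        = (d.modify p.1 [] (fun ts => ts ++ [p.2])).items.map pvPh from h3.symm]
    exact ih _ h1 h2

-- ===== VERDICT (by name: the statement is the Claim_ definition above) =====
theorem collect_unique_examples_from_examples_spec : Claim_equal_collect_unique_examples_from_examples := by
  intro examples _
  unfold Spec_collect_unique_examples_from_examples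
  have h := loop_eq examples PySem.Dict.empty (by intro p hp; cases hp) (by simp [PySem.Dict.empty])
  simp only [PySem.Dict.empty, List.map_nil] at h
  simp only [collect_unique_examples_from_examples, collect_unique_examples_from_examples_alt,
    PySem.Dict.empty]
  rw [h]
  congr 1
  rw [PySem.List.foldl_append_singleton_eq_map]
  rfl
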